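-- pv_equiv track=rewrite | github.com/hiroki83/university | lesson7/esercizio.py | non_divisibili
-- ===== SOURCE A (Python) =====
-- def non_divisibili(N, divisori):
--     rtn = []
--     for i in range(1,N+1):
--         for j in range(len(divisori)):
--             if i%divisori[j]==0:
--                 break
--             elif not j == len(divisori)-1:
--                 continue
--             else:
--                 rtn+=[i]
--     return rtn
-- ===== SOURCE B (Python) =====
-- def non_divisibili(N, divisori):
--     if not divisori or N < 1:
--         return []
--     marked = [False] * (N + 1)
--     for d in divisori:
--         a = abs(d)
--         if a:
--             for m in range(a, N + 1, a):
--                 marked[m] = True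
--     return [i for i in range(1, N + 1) if not marked[i]]
-- ===== Notes on version B (the rewrite author's own statement) =====
-- stated objective: faster
-- what changed: Replaces A's per-number trial division over every divisor with a sieve: mark the multiples of each divisor up to N in a boolean table, then collect the unmarked numbers (empty divisor list still yields [], as in A).
-- outside the precondition, e.g. on non_divisibili(5, [1, 0]): A returns [], B returns []
import Mathlib
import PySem

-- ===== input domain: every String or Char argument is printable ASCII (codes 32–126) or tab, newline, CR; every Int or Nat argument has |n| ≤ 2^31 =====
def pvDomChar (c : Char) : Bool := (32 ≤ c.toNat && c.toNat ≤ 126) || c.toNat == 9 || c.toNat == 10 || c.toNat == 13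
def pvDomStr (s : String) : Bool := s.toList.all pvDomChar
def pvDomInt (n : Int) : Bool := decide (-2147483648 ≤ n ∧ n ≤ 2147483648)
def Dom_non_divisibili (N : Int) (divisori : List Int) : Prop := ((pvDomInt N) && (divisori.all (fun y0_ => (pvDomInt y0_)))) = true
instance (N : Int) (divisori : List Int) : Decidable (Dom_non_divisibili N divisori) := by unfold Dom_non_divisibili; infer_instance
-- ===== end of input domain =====

-- B replaces A's per-number scan of all divisors by a sieve (mark multiples of each divisor into
-- a set, then collect the unmarked numbers): asymptotically faster, same return value on Pre_.

-- ===== PORT A =====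
-- inner 'for j in range(len(divisori))' loop of A, over the remaining indices js
def nonDivInner (i : Int) (divisori : List Int) (rtn : List Int) : List Nat → List Int
  | [] => rtn
  | j :: js =>
    if PySem.Int.mod i (PySem.List.pyGetD divisori (Int.ofNat j) 0) = 0 then rtn
    else if ¬((Int.ofNat j) = PySem.List.len divisori - 1) then nonDivInner i divisori rtn js
    else nonDivInner i divisori (rtn ++ [i]) js

def non_divisibili (N : Int) (divisori : List Int) : List Int :=
  (PySem.List.pyRange 1 (N + 1) 1).foldl
    (fun rtn i => nonDivInner i divisori rtn (List.range divisori.length)) []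

-- ===== PORT B =====
-- the inner 'for m in range(a, N + 1, a): marked[m] = True' loop of Source B (indices are in range)
def nonDivMark (N a : Int) (marked : Array Bool) : Array Bool :=
  (PySem.List.pyRange a (N + 1) a).foldl (fun m i => m.setIfInBounds i.toNat true) marked

-- the sieve table 'marked' of Source B after the 'for d in divisori' loop
def nonDivSieve (N : Int) (divisori : List Int) : Array Bool :=
  divisori.foldl (fun m d =>
    let a := d.natAbs
    if a ≠ 0 then nonDivMark N (Int.ofNat a) m else m)
    (Array.replicate (N + 1).toNat false)

def non_divisibili_alt (N : Int) (divisori : List Int) : List Int :=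
  if divisori = [] ∨ N < 1 then []
  else
    let marked := nonDivSieve N divisori
    (PySem.List.pyRange 1 (N + 1) 1).filter (fun i => !(marked.getD i.toNat false))

-- ===== PRECONDITION & SPEC =====
-- Pre_ excludes divisor lists containing 0 when N >= 1: there Python A raises ZeroDivisionError on i % 0,
-- except when an earlier divisor divides every i first (e.g. (5, [1, 0]), where A returns [] as B does).
def Pre_non_divisibili (N : Int) (divisori : List Int) : Prop := ¬(1 ≤ N ∧ (0 : Int) ∈ divisori)
instance (N : Int) (divisori : List Int) : Decidable (Pre_non_divisibili N divisori) := by unfold Pre_non_divisibili; infer_instance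
def pvWitness_non_divisibili : Int × List Int := (10, [2, 3])

def Spec_non_divisibili (N : Int) (divisori : List Int) (out : List Int) : Prop := out = non_divisibili_alt N divisori
instance (N : Int) (divisori : List Int) (out : List Int) : Decidable (Spec_non_divisibili N divisori out) := by unfold Spec_non_divisibili; infer_instance

-- ===== CLAIM (what is proved, stated in full; the proofs are below) =====
def Claim_equal_non_divisibili : Prop := ∀ (N : Int) (divisori : List Int), Dom_non_divisibili N divisori → Pre_non_divisibili N divisori → Spec_non_divisibili N divisori (non_divisibili N divisori)
-- ===== LEMMAS AND PROOFS =====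

-- A's inner loop, over the index suffix range' k (len - k), appends i iff no remaining divisor hits
lemma nonDivInner_spec (i : Int) (ds : List Int) :
    ∀ (n k : Nat) (rtn : List Int), k < ds.length → ds.length - k = n →
    nonDivInner i ds rtn (List.range' k (ds.length - k)) =
      if ∀ d ∈ ds.drop k, PySem.Int.mod i d ≠ 0 then rtn ++ [i] else rtn := by
  intro n
  induction n with
  | zero => intro k rtn hk hn; omega
  | succ n ih =>
    intro k rtn hk hn
    have hdrop : ds[k] :: List.drop (k + 1) ds = List.drop k ds := List.getElem_cons_drop hk
    have hrange : List.range' k (ds.length - k) = k :: List.range' (k + 1) n := by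
      rw [hn]; rw [List.range'_succ]
    rw [hrange]
    simp only [nonDivInner, Int.ofNat_eq_natCast, PySem.List.pyGetD_natCast, PySem.List.len_eq]
    have hget : ds.getD k 0 = ds[k] := List.getD_eq_getElem ds 0 hk
    rw [hget]
    by_cases hz : PySem.Int.mod i ds[k] = 0
    · rw [if_pos hz, if_neg]
      intro hall
      exact hall ds[k] (by rw [← hdrop]; exact List.mem_cons_self ..) hz
    · rw [if_neg hz]
      by_cases hlast : k = ds.length - 1
      · have heq : ((k : Int) = (ds.length : Int) - 1) := by omega
        rw [if_neg (not_not_intro heq)]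
        have hn0 : n = 0 := by omega
        subst hn0
        simp only [List.range'_zero, nonDivInner]
        rw [if_pos]
        intro d hd
        have : List.drop k ds = [ds[k]] := by
          rw [← hdrop]
          have : List.drop (k + 1) ds = [] := List.drop_eq_nil_of_le (by omega)
          rw [this]
        rw [this] at hd
        simp only [List.mem_singleton] at hd
        subst hd; exact hz
      · have hne : ¬((k : Int) = (ds.length : Int) - 1) := by omega
        rw [if_pos hne]
        have hk1 : k + 1 < ds.length := by omega
        have := ih (k + 1) rtn hk1 (by omega)
        rw [show ds.length - (k + 1) = n from by omega] at this
        rw [this]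
        congr 1
        simp only [eq_iff_iff]
        constructor
        · intro hall d hd
          rw [← hdrop] at hd
          rcases List.mem_cons.mp hd with h1 | h1
          · subst h1; exact hz
          · exact hall d h1
        · intro hall d hd
          exact hall d (by rw [← hdrop]; exact List.mem_cons_of_mem _ hd)

-- marking a list of in-range indices true: which entries read true afterwards
lemma foldl_mark_getElem? (l : List Int) :
    ∀ (m : Array Bool) (k : Nat), (∀ x ∈ l, 0 ≤ x ∧ x.toNat < m.size) →
      ((l.foldl (fun m i => m.setIfInBounds i.toNat true) m)[k]? = some true ↔
        m[k]? = some true ∨ (k : Int) ∈ l) := by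
  induction l with
  | nil => intro m k _; simp
  | cons x l ih =>
    intro m k h
    have hx := h x (List.mem_cons_self ..)
    rw [List.foldl_cons]
    rw [ih (m.setIfInBounds x.toNat true) k
      (fun y hy => by rw [Array.size_setIfInBounds]; exact h y (List.mem_cons_of_mem _ hy))]
    rw [Array.getElem?_setIfInBounds]
    simp only [List.mem_cons]
    by_cases hxk : x.toNat = k
    · rw [if_pos hxk, if_pos (hxk ▸ hx.2)]
      constructor
      · intro _; exact Or.inr (Or.inl (by omega))
      · intro _; exact Or.inl rfl
    · rw [if_neg hxk]
      have hne : ¬((k : Int) = x) := by omega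
      tauto

-- the mark loop does not change the table's size
lemma nonDivMark_size (N a : Int) (marked : Array Bool) :
    (nonDivMark N a marked).size = marked.size := by
  unfold nonDivMark
  induction (PySem.List.pyRange a (N + 1) a) generalizing marked with
  | nil => rfl
  | cons x l ih => rw [List.foldl_cons, ih]; exact Array.size_setIfInBounds

-- which entries of the sieve table read true: exactly the marked multiples
lemma sieve_aux (N : Int) (ds : List Int) :
    ∀ (m : Array Bool), m.size = (N + 1).toNat → ∀ (k : Nat),
      ((ds.foldl (fun m d =>
          let a := d.natAbs
          if a ≠ 0 then nonDivMark N (Int.ofNat a) m else m) m)[k]? = some true ↔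
        m[k]? = some true ∨ ∃ d ∈ ds, d.natAbs ≠ 0 ∧
          (k : Int) ∈ PySem.List.pyRange (Int.ofNat d.natAbs) (N + 1) (Int.ofNat d.natAbs)) := by
  induction ds with
  | nil => intro m _ k; simp
  | cons d ds ih =>
    intro m hm k
    rw [List.foldl_cons]
    by_cases h : d.natAbs ≠ 0
    · rw [show (let a := d.natAbs;
          if a ≠ 0 then nonDivMark N (Int.ofNat a) m else m) = nonDivMark N (Int.ofNat d.natAbs) m
        from if_pos h]
      rw [ih (nonDivMark N (Int.ofNat d.natAbs) m) (by rw [nonDivMark_size]; exact hm) k]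
      have hpos : (0 : Int) < Int.ofNat d.natAbs := by
        simp only [Int.ofNat_eq_natCast]; exact_mod_cast Nat.pos_of_ne_zero h
      have hmark := foldl_mark_getElem? (PySem.List.pyRange (Int.ofNat d.natAbs) (N + 1) (Int.ofNat d.natAbs)) m k
        (fun x hx => by
          rw [PySem.List.mem_pyRange_iff_of_pos hpos] at hx
          constructor
          · omega
          · rw [hm]; omega)
      rw [show nonDivMark N (Int.ofNat d.natAbs) m =
          (PySem.List.pyRange (Int.ofNat d.natAbs) (N + 1) (Int.ofNat d.natAbs)).foldl
            (fun m i => m.setIfInBounds i.toNat true) m from rfl]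
      rw [hmark]
      simp only [List.mem_cons]
      constructor
      · rintro ((hs | hr) | ⟨d', hd', h1, h2⟩)
        · exact Or.inl hs
        · exact Or.inr ⟨d, Or.inl rfl, h, hr⟩
        · exact Or.inr ⟨d', Or.inr hd', h1, h2⟩
      · rintro (hs | ⟨d', hd' | hd', h1, h2⟩)
        · exact Or.inl (Or.inl hs)
        · subst hd'; exact Or.inl (Or.inr h2)
        · exact Or.inr ⟨d', hd', h1, h2⟩
    · rw [show (let a := d.natAbs;
          if a ≠ 0 then nonDivMark N (Int.ofNat a) m else m) = m from if_neg h]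
      rw [ih m hm k]
      simp only [not_not] at h
      simp only [List.mem_cons]
      constructor
      · rintro (hs | ⟨d', hd', h1, h2⟩)
        · exact Or.inl hs
        · exact Or.inr ⟨d', Or.inr hd', h1, h2⟩
      · rintro (hs | ⟨d', hd' | hd', h1, h2⟩)
        · exact Or.inl hs
        · subst hd'; exact absurd h h1
        · exact Or.inr ⟨d', hd', h1, h2⟩

-- ===== VERDICT (by name: the statement is the Claim_ definition above) =====
theorem non_divisibili_spec : Claim_equal_non_divisibili := by
  intro N ds _ hpre
  unfold Spec_non_divisibili non_divisibili non_divisibili_alt Pre_non_divisibili at *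
  by_cases hds : ds = []
  · subst hds
    simp [nonDivInner]
  · by_cases hN : N < 1
    · rw [if_pos (Or.inr hN)]
      rw [PySem.List.pyRange_one_eq_nil (by omega)]
      simp
    · rw [if_neg (by tauto)]
      have h0 : (0 : Int) ∉ ds := fun h => hpre ⟨by omega, h⟩
      have hlen : 0 < ds.length := List.length_pos_iff.mpr hds
      have hbody : ∀ (rtn : List Int) (i : Int),
          nonDivInner i ds rtn (List.range ds.length) =
            if ∀ d ∈ ds, PySem.Int.mod i d ≠ 0 then rtn ++ [i] else rtn := by
        intro rtn i
        have := nonDivInner_spec i ds ds.length 0 rtn hlen (by omega)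
        rw [Nat.sub_zero, ← List.range_eq_range'] at this
        simpa using this
      simp only [hbody]
      rw [PySem.List.foldl_append_ite_eq_filter, List.nil_append]
      apply List.filter_congr
      intro i hi
      rw [PySem.List.mem_pyRange_one] at hi
      have hk : i.toNat < (N + 1).toNat := by omega
      have hiff : ((nonDivSieve N ds).getD i.toNat false = true) ↔ ∃ d ∈ ds, d ∣ i := by
        have hsz : (nonDivSieve N ds).size = (N + 1).toNat := by
          unfold nonDivSieve
          have : ∀ (l : List Int) (m : Array Bool),
              (l.foldl (fun m d =>
                let a := d.natAbs
                if a ≠ 0 then nonDivMark N (Int.ofNat a) m else m) m).size = m.size := by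
            intro l
            induction l with
            | nil => intro m; rfl
            | cons d l ihl =>
              intro m
              rw [List.foldl_cons, ihl]
              by_cases h : d.natAbs ≠ 0
              · rw [show (let a := d.natAbs;
                    if a ≠ 0 then nonDivMark N (Int.ofNat a) m else m) =
                    nonDivMark N (Int.ofNat d.natAbs) m from if_pos h]
                exact nonDivMark_size ..
              · rw [show (let a := d.natAbs;
                    if a ≠ 0 then nonDivMark N (Int.ofNat a) m else m) = m from if_neg h]
          rw [this, Array.size_replicate]
        have haux := sieve_aux N ds (Array.replicate (N + 1).toNat false)
          (by rw [Array.size_replicate]) i.toNat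
        rw [Array.getElem?_replicate, if_pos hk] at haux
        have hsome : ((nonDivSieve N ds).getD i.toNat false = true) ↔
            (nonDivSieve N ds)[i.toNat]? = some true := by
          rw [Array.getD_eq_getD_getElem?,
            Array.getElem?_eq_getElem (by omega : i.toNat < (nonDivSieve N ds).size)]
          simp
        rw [hsome]
        rw [show (nonDivSieve N ds)[i.toNat]? =
            (ds.foldl (fun m d =>
              let a := d.natAbs
              if a ≠ 0 then nonDivMark N (Int.ofNat a) m else m)
              (Array.replicate (N + 1).toNat false))[i.toNat]? from rfl]
        rw [haux]
        simp only [Option.some.injEq, Bool.false_eq_true, false_or]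
        constructor
        · rintro ⟨d, hd, ha, hr⟩
          have hpos : (0 : Int) < Int.ofNat d.natAbs := by
            simp only [Int.ofNat_eq_natCast]; exact_mod_cast Nat.pos_of_ne_zero ha
          rw [PySem.List.mem_pyRange_iff_of_pos hpos] at hr
          refine ⟨d, hd, ?_⟩
          have h1 : (d.natAbs : Int) ∣ (i.toNat : Int) - Int.ofNat d.natAbs := hr.2.2
          simp only [Int.ofNat_eq_natCast] at h1
          have h2 : (d.natAbs : Int) ∣ (i.toNat : Int) := by simpa using dvd_add h1 dvd_rfl
          have h3 : (i.toNat : Int) = i := by omega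
          rw [h3] at h2
          exact Int.natAbs_dvd.mp h2
        · rintro ⟨d, hd, hdvd⟩
          have hd0 : d ≠ 0 := fun h => h0 (h ▸ hd)
          have ha : d.natAbs ≠ 0 := Int.natAbs_ne_zero.mpr hd0
          have hpos : (0 : Int) < Int.ofNat d.natAbs := by
            simp only [Int.ofNat_eq_natCast]; exact_mod_cast Nat.pos_of_ne_zero ha
          refine ⟨d, hd, ha, ?_⟩
          rw [PySem.List.mem_pyRange_iff_of_pos hpos]
          have hdvd' : (d.natAbs : Int) ∣ i := Int.natAbs_dvd.mpr hdvd
          have h3 : (i.toNat : Int) = i := by omega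
          rw [h3]
          refine ⟨Int.le_of_dvd (by omega) hdvd', by omega, ?_⟩
          simp only [Int.ofNat_eq_natCast]
          exact dvd_sub hdvd' dvd_rfl
      rw [Bool.eq_iff_iff]
      simp only [decide_eq_true_eq, Bool.not_eq_true', ← Bool.not_eq_true, hiff]
      constructor
      · intro h hx
        rcases hx with ⟨d, hd, hdvd⟩
        exact h d hd ((PySem.Int.mod_eq_zero_iff_dvd i d).mpr hdvd)
      · intro h d hd hmod
        exact h ⟨d, hd, (PySem.Int.mod_eq_zero_iff_dvd i d).mp hmod⟩
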